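-- pv_equiv track=rewrite | github.com/annashell/master_progr_2_year | scripts/nlp/seq2seq.py | my_replacer
-- ===== SOURCE A (Python) =====
-- def my_replacer(s):
--     ''' Функция для удаления пробелов перед знаками препинания
--
--         Args: строка или список строк
--
--         Returns: строка или список строк
--     '''
--
--     if isinstance(s, str):  # Если получили строку
--
--         # Убираем перед знаками препинания пробел и возвращаем
--         return s.replace(' .', '.').replace(' ,', ',').replace(' !', '!').replace(' ?', '?')
--
--     if isinstance(s, list):  # Если получили список
--         ou = []  # Заготовим пустой список
--
--         for l in s:  # Цикл по строкам из списка
--             ou.append(l.replace(' .', '.').replace(' ,', ',').replace(' !', '!').replace(' ?',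
--                                                                                          '?'))  # Убираем перед знаками препинания пробел и возвращаем
--
--         # Вернем список строк
--         return ou
-- ===== SOURCE B (Python) =====
-- def my_replacer(s):
--     ''' Remove spaces before punctuation: single left-to-right pass instead of four chained .replace scans. '''
--     if isinstance(s, str):
--         out = []
--         i = 0
--         n = len(s)
--         while i < n:
--             if s[i] == ' ' and i + 1 < n and s[i + 1] in '.,!?':
--                 out.append(s[i + 1])
--                 i += 2
--             else:
--                 out.append(s[i])
--                 i += 1
--         return ''.join(out)
--     if isinstance(s, list):
--         return [my_replacer(x) for x in s]
-- ===== Notes on version B (the rewrite author's own statement) =====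
-- stated objective: alternative
-- what changed: A makes four sequential full-string .replace passes, one per punctuation mark, building three intermediate strings; B makes a single left-to-right pass over the characters, dropping a space whenever it immediately precedes one of the four punctuation marks.
import Mathlib
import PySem

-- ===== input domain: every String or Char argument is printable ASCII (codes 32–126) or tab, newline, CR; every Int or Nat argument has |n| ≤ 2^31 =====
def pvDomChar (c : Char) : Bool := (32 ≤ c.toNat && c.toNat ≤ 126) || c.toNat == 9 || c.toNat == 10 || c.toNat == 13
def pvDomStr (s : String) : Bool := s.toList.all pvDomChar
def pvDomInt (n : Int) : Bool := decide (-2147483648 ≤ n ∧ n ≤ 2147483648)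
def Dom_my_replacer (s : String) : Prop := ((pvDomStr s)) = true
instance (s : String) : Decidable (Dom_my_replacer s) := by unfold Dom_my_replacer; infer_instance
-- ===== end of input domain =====

-- B replaces A's four chained full-string .replace scans by one single left-to-right pass (simpler/alternative; return value proved equal).

-- ===== PORT A =====
def my_replacer (s : String) : String :=
  PySem.Str.replace (PySem.Str.replace (PySem.Str.replace (PySem.Str.replace s " ." ".") " ," ",") " !" "!") " ?" "?"

-- ===== PORT B =====
-- single pass over the characters: a space immediately followed by a punctuation mark is dropped
def altLoop : List Char → List Char
  | a :: b :: t =>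
    if a = ' ' ∧ (b = '.' ∨ b = ',' ∨ b = '!' ∨ b = '?') then b :: altLoop t
    else a :: altLoop (b :: t)
  | l => l

def my_replacer_alt (s : String) : String := String.ofList (altLoop s.toList)

-- ===== PRECONDITION & SPEC =====
def Spec_my_replacer (s : String) (out : String) : Prop := out = my_replacer_alt s
instance (s : String) (out : String) : Decidable (Spec_my_replacer s out) := by unfold Spec_my_replacer; infer_instance

-- ===== CLAIM (what is proved, stated in full; the proofs are below) =====
def Claim_equal_my_replacer : Prop := ∀ (s : String), Dom_my_replacer s → Spec_my_replacer s (my_replacer s)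

-- ===== LEMMAS AND PROOFS =====

-- one .replace(' '+p, p) pass, written as structural recursion (no fuel)
def rep1 (p : Char) : List Char → List Char
  | a :: b :: t => if a = ' ' ∧ b = p then p :: rep1 p t else a :: rep1 p (b :: t)
  | l => l

theorem rep1_nil (p : Char) : rep1 p [] = [] := rfl

theorem rep1_single (p c : Char) : rep1 p [c] = [c] := rfl

theorem rep1_cons_cons (p a b : Char) (t : List Char) :
    rep1 p (a :: b :: t) = if a = ' ' ∧ b = p then p :: rep1 p t else a :: rep1 p (b :: t) := rfl

theorem rep1_cons_ne_space (p a : Char) (l : List Char) (h : a ≠ ' ') :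
    rep1 p (a :: l) = a :: rep1 p l := by
  cases l with
  | nil => rfl
  | cons b t => rw [rep1_cons_cons, if_neg (by simp [h])]

theorem rep1_cons_space (p : Char) (l : List Char) (h : l.head? ≠ some p) :
    rep1 p (' ' :: l) = ' ' :: rep1 p l := by
  cases l with
  | nil => rfl
  | cons b t =>
    have hb : b ≠ p := by simpa using h
    rw [rep1_cons_cons, if_neg (by simp [hb])]

theorem rep1_head (p : Char) (l : List Char) :
    (rep1 p l).head? = some p ∨ (rep1 p l).head? = l.head? := by
  cases l with
  | nil => right; rfl
  | cons a t =>
    cases t with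
    | nil => right; rfl
    | cons b t' =>
      rw [rep1_cons_cons]
      by_cases h : a = ' ' ∧ b = p
      · left; rw [if_pos h]; rfl
      · right; rw [if_neg h]; rfl

theorem head_rep1_ne (p q : Char) (l : List Char) (hl : l.head? ≠ some q) (hpq : p ≠ q) :
    (rep1 p l).head? ≠ some q := by
  rcases rep1_head p l with h | h <;> simp_all

-- unfolding equations for the library's fuel-based replace.go (each holds by rfl)
theorem go_zero (old new l acc : List Char) :
    PySem.Chars.replace.go old new 0 l acc = acc.reverse ++ l := rfl

theorem go_nil (old new acc : List Char) (f : Nat) :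
    PySem.Chars.replace.go old new (f + 1) [] acc = acc.reverse := rfl

theorem go_cons (old new acc t : List Char) (c : Char) (f : Nat) :
    PySem.Chars.replace.go old new (f + 1) (c :: t) acc =
      if old.isPrefixOf (c :: t) then
        PySem.Chars.replace.go old new f (List.drop old.length (c :: t)) (new.reverse ++ acc)
      else PySem.Chars.replace.go old new f t (c :: acc) := rfl

theorem isPrefixOf_pair_cons_cons (p c c' : Char) (t' : List Char) :
    List.isPrefixOf [' ', p] (c :: c' :: t') = (' ' == c && p == c') := by
  show (' ' == c && (p == c' && List.isPrefixOf [] t')) = _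
  simp [List.isPrefixOf]

theorem isPrefixOf_pair_single (p c : Char) : List.isPrefixOf [' ', p] [c] = false := by
  show (' ' == c && List.isPrefixOf [p] []) = false
  simp [List.isPrefixOf]

theorem replace_go_eq (p : Char) (fuel : Nat) (l acc : List Char) (hf : l.length ≤ fuel) :
    PySem.Chars.replace.go [' ', p] [p] fuel l acc = acc.reverse ++ rep1 p l := by
  induction fuel generalizing l acc with
  | zero =>
    have : l = [] := by cases l <;> simp_all
    subst this; rw [go_zero, rep1_nil]
  | succ f ih =>
    cases l with
    | nil => rw [go_nil, rep1_nil, List.append_nil]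
    | cons c t =>
      rw [go_cons]
      by_cases hpre : List.isPrefixOf [' ', p] (c :: t)
      · obtain ⟨c', t', rfl⟩ : ∃ c' t', t = c' :: t' := by
          cases t with
          | nil => rw [isPrefixOf_pair_single] at hpre; exact absurd hpre (by simp)
          | cons x y => exact ⟨x, y, rfl⟩
        have hc : c = ' ' ∧ c' = p := by
          have h' := hpre
          rw [isPrefixOf_pair_cons_cons, Bool.and_eq_true, beq_iff_eq, beq_iff_eq] at h'
          exact ⟨h'.1.symm, h'.2.symm⟩
        obtain ⟨rfl, rfl⟩ := hc
        have hlen : t'.length ≤ f := by simp at hf; omega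
        rw [if_pos hpre]
        simp only [List.length_cons, List.length_nil, List.drop_succ_cons, List.drop_zero]
        rw [ih _ _ hlen, rep1_cons_cons, if_pos ⟨rfl, rfl⟩]
        simp
      · have hlen : t.length ≤ f := by simp at hf; omega
        rw [if_neg hpre, ih _ _ hlen]
        cases t with
        | nil => simp [rep1_single, rep1_nil]
        | cons b t2 =>
          have hc : ¬ (c = ' ' ∧ b = p) := by
            intro ⟨h1, h2⟩; exact hpre (by rw [isPrefixOf_pair_cons_cons]; simp [h1, h2])
          rw [rep1_cons_cons, if_neg hc]
          simp

theorem replace_eq_rep1 (p : Char) (l : List Char) :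
    PySem.Chars.replace l [' ', p] [p] = rep1 p l := by
  rw [PySem.Chars.replace]
  simp only [List.isEmpty_cons, Bool.false_eq_true, if_false]
  simpa using replace_go_eq p l.length l [] le_rfl

-- a pass whose pattern char differs from q walks over a leading ' ' :: q
theorem rep1_space_cons (p q : Char) (t : List Char) (hq1 : q ≠ p) (hq2 : q ≠ ' ') :
    rep1 p (' ' :: q :: t) = ' ' :: q :: rep1 p t := by
  rw [rep1_cons_space p (q :: t) (by simp [hq1]), rep1_cons_ne_space p q t hq2]

-- the four single-pattern passes compose to the one combined pass
theorem comp4_eq_altLoop (l : List Char) :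
    rep1 '?' (rep1 '!' (rep1 ',' (rep1 '.' l))) = altLoop l := by
  fun_induction altLoop l with
  | case1 a b t hcond ih =>
    obtain ⟨rfl, hb⟩ := hcond
    rcases hb with rfl | rfl | rfl | rfl
    · rw [rep1_cons_cons, if_pos ⟨rfl, rfl⟩,
        rep1_cons_ne_space ',' '.' _ (by decide),
        rep1_cons_ne_space '!' '.' _ (by decide),
        rep1_cons_ne_space '?' '.' _ (by decide), ih]
    · rw [rep1_space_cons '.' ',' t (by decide) (by decide),
        rep1_cons_cons, if_pos ⟨rfl, rfl⟩,
        rep1_cons_ne_space '!' ',' _ (by decide),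
        rep1_cons_ne_space '?' ',' _ (by decide), ih]
    · rw [rep1_space_cons '.' '!' t (by decide) (by decide),
        rep1_space_cons ',' '!' _ (by decide) (by decide),
        rep1_cons_cons, if_pos ⟨rfl, rfl⟩,
        rep1_cons_ne_space '?' '!' _ (by decide), ih]
    · rw [rep1_space_cons '.' '?' t (by decide) (by decide),
        rep1_space_cons ',' '?' _ (by decide) (by decide),
        rep1_space_cons '!' '?' _ (by decide) (by decide),
        rep1_cons_cons, if_pos ⟨rfl, rfl⟩, ih]
  | case2 a b t hcond ih =>
    by_cases ha : a = ' '
    · subst ha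
      have hb : ¬ (b = '.' ∨ b = ',' ∨ b = '!' ∨ b = '?') := fun h => hcond ⟨rfl, h⟩
      have h1 : b ≠ '.' := fun h => hb (Or.inl h)
      have h2 : b ≠ ',' := fun h => hb (Or.inr (Or.inl h))
      have h3 : b ≠ '!' := fun h => hb (Or.inr (Or.inr (Or.inl h)))
      have h4 : b ≠ '?' := fun h => hb (Or.inr (Or.inr (Or.inr h)))
      have hd1 : (rep1 '.' (b :: t)).head? ≠ some ',' :=
        head_rep1_ne '.' ',' _ (by simp [h2]) (by decide)
      have hd2 : (rep1 ',' (rep1 '.' (b :: t))).head? ≠ some '!' :=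
        head_rep1_ne ',' '!' _ (head_rep1_ne '.' '!' _ (by simp [h3]) (by decide)) (by decide)
      have hd3 : (rep1 '!' (rep1 ',' (rep1 '.' (b :: t)))).head? ≠ some '?' :=
        head_rep1_ne '!' '?' _ (head_rep1_ne ',' '?' _ (head_rep1_ne '.' '?' _ (by simp [h4]) (by decide)) (by decide)) (by decide)
      rw [rep1_cons_space '.' (b :: t) (by simp [h1]),
        rep1_cons_space ',' _ hd1,
        rep1_cons_space '!' _ hd2,
        rep1_cons_space '?' _ hd3, ih]
    · rw [rep1_cons_ne_space '.' a _ ha, rep1_cons_ne_space ',' a _ ha,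
        rep1_cons_ne_space '!' a _ ha, rep1_cons_ne_space '?' a _ ha, ih]
  | case3 l h1 =>
    rcases l with _ | ⟨c, _ | ⟨d, t⟩⟩
    · rfl
    · rfl
    · exact absurd rfl (h1 c d t)

-- ===== VERDICT (by name: the statement is the Claim_ definition above) =====
theorem my_replacer_spec : Claim_equal_my_replacer := by
  intro s _
  show _ = _
  unfold my_replacer my_replacer_alt
  simp only [PySem.Str.replace, String.toList_ofList,
    show " .".toList = [' ', '.'] from rfl, show ".".toList = ['.'] from rfl,
    show " ,".toList = [' ', ','] from rfl, show ",".toList = [','] from rfl,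
    show " !".toList = [' ', '!'] from rfl, show "!".toList = ['!'] from rfl,
    show " ?".toList = [' ', '?'] from rfl, show "?".toList = ['?'] from rfl,
    replace_eq_rep1, comp4_eq_altLoop]
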